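-- pv_equiv track=rewrite | github.com/jtricerolph/forecasting-app-docker | backend/services/forecasting/prophet_tuned.py | get_lead_time_column
-- ===== SOURCE A (Python) =====
-- def get_lead_time_column(lead_days: int) -> str:
--     """
--     Map lead days to the appropriate column in newbook_booking_pace.
--     """
--     if lead_days <= 0:
--         return "d0"
--     elif lead_days <= 30:
--         return f"d{lead_days}"
--     elif lead_days <= 177:
--         # Weekly intervals - find nearest column
--         weekly_cols = [37, 44, 51, 58, 65, 72, 79, 86, 93, 100, 107, 114, 121, 128, 135, 142, 149, 156, 163, 170, 177]
--         for col in weekly_cols: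
--             if lead_days <= col:
--                 return f"d{col}"
--         return "d177"
--     else:
--         # Monthly intervals
--         monthly_cols = [210, 240, 270, 300, 330, 365]
--         for col in monthly_cols:
--             if lead_days <= col:
--                 return f"d{col}"
--         return "d365"
-- ===== SOURCE B (Python) =====
-- # One ascending table of column days; a hand-rolled binary search (bisect_left)
-- # replaces the branch chain and the two linear scans.
-- COLS = list(range(31)) + list(range(37, 178, 7)) + [210, 240, 270, 300, 330, 365]
--
--
-- def get_lead_time_column(lead_days: int) -> str:
--     if lead_days <= 0:
--         return "d0"
--     lo, hi = 0, len(COLS)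
--     while lo < hi:
--         mid = (lo + hi) // 2
--         if COLS[mid] < lead_days:
--             lo = mid + 1
--         else:
--             hi = mid
--     if lo == len(COLS):
--         return "d365"
--     return f"d{COLS[lo]}"
-- ===== Notes on version B (the rewrite author's own statement) =====
-- stated objective: alternative
-- what changed: Replaced the branch chain with two linear scans by one precomputed ascending table of column days searched with a hand-written binary search (bisect_left) plus clamping at both ends.
import Mathlib
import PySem

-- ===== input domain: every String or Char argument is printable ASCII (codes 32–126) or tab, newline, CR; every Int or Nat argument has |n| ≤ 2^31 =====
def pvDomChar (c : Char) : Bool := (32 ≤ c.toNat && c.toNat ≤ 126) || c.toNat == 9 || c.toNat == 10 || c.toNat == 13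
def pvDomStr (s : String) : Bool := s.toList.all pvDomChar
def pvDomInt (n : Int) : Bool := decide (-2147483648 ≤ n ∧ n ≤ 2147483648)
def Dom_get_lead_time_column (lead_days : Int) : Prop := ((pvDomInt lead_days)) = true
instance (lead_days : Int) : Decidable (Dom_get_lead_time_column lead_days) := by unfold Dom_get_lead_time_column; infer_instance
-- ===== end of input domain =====

-- B replaces A's branch chain + two linear scans by one ascending table with a binary search; objective: alternative (different data structure).

-- ===== PORT A =====
-- 'for col in cols: if lead_days <= col: return f"d{col}"' followed by 'return default'
def pvScanA (cols : List Int) (lead_days : Int) (default : String) : String :=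
  match cols with
  | [] => default
  | c :: rest => if lead_days ≤ c then "d" ++ PySem.Int.toStr c else pvScanA rest lead_days default

def get_lead_time_column (lead_days : Int) : String :=
  if lead_days ≤ 0 then "d0"
  else if lead_days ≤ 30 then "d" ++ PySem.Int.toStr lead_days
  else if lead_days ≤ 177 then
    pvScanA [37, 44, 51, 58, 65, 72, 79, 86, 93, 100, 107, 114, 121, 128, 135, 142, 149, 156, 163, 170, 177] lead_days "d177"
  else
    pvScanA [210, 240, 270, 300, 330, 365] lead_days "d365"

-- ===== PORT B =====
-- COLS = list(range(31)) + list(range(37,178,7)) + [210,240,270,300,330,365]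
def pvCOLS : List Int :=
  PySem.List.pyRange 0 31 1 ++ PySem.List.pyRange 37 178 7 ++ [210, 240, 270, 300, 330, 365]

-- the while-loop of Source B, with an explicit fuel bounding its iteration count
-- (hi - lo ≤ fuel suffices; the caller passes the list length);
-- xs.getD mid 0 is exact since mid is always in range in Source B
def pvBisect (fuel : Nat) (xs : List Int) (target : Int) (lo hi : Nat) : Nat :=
  match fuel with
  | 0 => lo
  | fuel + 1 =>
    if lo < hi then
      if xs.getD ((lo + hi) / 2) 0 < target then pvBisect fuel xs target ((lo + hi) / 2 + 1) hi
      else pvBisect fuel xs target lo ((lo + hi) / 2)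
    else lo

def get_lead_time_column_alt (lead_days : Int) : String :=
  if lead_days ≤ 0 then "d0"
  else
    let lo := pvBisect pvCOLS.length pvCOLS lead_days 0 pvCOLS.length
    if lo = pvCOLS.length then "d365"
    else "d" ++ PySem.Int.toStr (pvCOLS.getD lo 0)

-- ===== PRECONDITION & SPEC =====
def Spec_get_lead_time_column (lead_days : Int) (out : String) : Prop := out = get_lead_time_column_alt lead_days
instance (lead_days : Int) (out : String) : Decidable (Spec_get_lead_time_column lead_days out) := by unfold Spec_get_lead_time_column; infer_instance

-- ===== CLAIM (what is proved, stated in full; the proofs are below) =====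
def Claim_equal_get_lead_time_column : Prop := ∀ (lead_days : Int), Dom_get_lead_time_column lead_days → Spec_get_lead_time_column lead_days (get_lead_time_column lead_days)

-- ===== LEMMAS AND PROOFS =====

-- if the target exceeds every table entry in [lo,hi) and the fuel suffices, the search returns hi
theorem pvBisect_all_lt : ∀ (fuel : Nat) (xs : List Int) (t : Int) (lo hi : Nat),
    lo ≤ hi → hi - lo ≤ fuel → (∀ i, lo ≤ i → i < hi → xs.getD i 0 < t) →
    pvBisect fuel xs t lo hi = hi := by
  intro fuel
  induction fuel with
  | zero => intro xs t lo hi h1 h2 _; simp only [pvBisect]; omega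
  | succ n ih =>
    intro xs t lo hi h1 h2 h
    by_cases hlt : lo < hi
    · simp only [pvBisect, if_pos hlt]
      rw [if_pos (h _ (by omega) (by omega))]
      exact ih _ _ _ _ (by omega) (by omega) (fun i hi1 hi2 => h i (by omega) hi2)
    · simp only [pvBisect, if_neg hlt]; omega

theorem pvScanA_all_lt (cols : List Int) (t : Int) (d : String)
    (h : ∀ c ∈ cols, c < t) : pvScanA cols t d = d := by
  induction cols with
  | nil => rfl
  | cons c rest ih =>
    simp only [pvScanA]
    rw [if_neg (by have := h c (by simp); omega)]
    exact ih (fun c hc => h c (by simp [hc]))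

theorem pvCOLS_bound : ∀ i, i < pvCOLS.length → pvCOLS.getD i 0 < 366 := by
  decide

-- ===== VERDICT (by name: the statement is the Claim_ definition above) =====
theorem get_lead_time_column_spec : Claim_equal_get_lead_time_column := by
  intro n _
  unfold Spec_get_lead_time_column
  by_cases h0 : n ≤ 0
  · simp [get_lead_time_column, get_lead_time_column_alt, h0]
  · by_cases h365 : n ≤ 365
    · interval_cases n <;> decide
    · unfold get_lead_time_column get_lead_time_column_alt
      rw [if_neg h0, if_neg (by omega), if_neg (by omega), if_neg h0]
      rw [pvBisect_all_lt pvCOLS.length pvCOLS n 0 pvCOLS.length (Nat.zero_le _) (by omega)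
            (fun i _ hi => by have := pvCOLS_bound i hi; omega)]
      rw [if_pos rfl]
      exact pvScanA_all_lt _ _ _ (by intro c hc; fin_cases hc <;> omega)
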